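-- pv_equiv track=rewrite | github.com/strahinjastevanovic/ETL_HemOnc_regimens | src/tools/sre_tools.py | collapse_event_matrix
-- ===== SOURCE A (Python) =====
-- def collapse_event_matrix(event_string):
--     components = sorted(event_string.keys())
--     num_days = len(next(iter(event_string.values())))
--
--     for k, v in event_string.items():
--         if len(v) != num_days:
--             raise ValueError(f"Component '{k}' has mismatched length.")
--
--     # Create a unified event matrix of 1s where any drug is active
--     unified_events = [0] * num_days
--     for v in event_string.values():
--         for i, val in enumerate(v):
--             if val == 1:
--                 unified_events[i] = 1
--
--     # Precompute all event days
--     event_days = [i for i, val in enumerate(unified_events) if val == 1]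
--
--     tag_entries = []
--     for day in event_days:
--         active_names = sorted([comp for comp in components if event_string[comp][day] == 1])
--         if active_names:
--             tag_entries.append((day, active_names))
--
--     if not tag_entries:
--         return ""
--
--     last_day = tag_entries[-1][0]
--     shift = num_days - last_day  # Same logic as before
--
--     output = []
--     used_shift = False
--     event_index = 0
--     component_first_use = set()
--
--     for day, names in tag_entries:
--         main = names[0]
--
--         if not used_shift:
--             tag = f"{shift}.{main}"
--             used_shift = True
--         else:
--             delta = event_days[event_index] - event_days[event_index - 1]
--             tag = f"{delta}.{main}"
--
--         output.append(tag)
--         component_first_use.add(main)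
--
--         for name in names[1:]:
--             tag = f"0.{name}"
--             output.append(tag)
--             component_first_use.add(name)
--
--         event_index += 1
--
--     if len(component_first_use) == 1:
--         return ";".join(output + output)
--
--     return ";".join(output)
-- ===== SOURCE B (Python) =====
-- def collapse_event_matrix(event_string):
--     num_days = len(next(iter(event_string.values())))
--     for k, v in event_string.items():
--         if len(v) != num_days:
--             raise ValueError(f"Component '{k}' has mismatched length.")
--
--     # Inverted index, built component-major: day -> active names (sorted, since
--     # components are visited in sorted order). Replaces A's unified 0/1 mask,
--     # its event-day list and its per-event-day rescans of all components.
--     buckets = {}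
--     for comp in sorted(event_string):
--         for day, val in enumerate(event_string[comp]):
--             if val == 1:
--                 buckets.setdefault(day, []).append(comp)
--
--     days = sorted(buckets)
--     if not days:
--         return ""
--
--     # Gap prefixes, precomputed by zipping the day list with itself.
--     deltas = [num_days - days[-1]] + [b - a for a, b in zip(days, days[1:])]
--
--     output = []
--     for delta, day in zip(deltas, days):
--         head, *rest = buckets[day]
--         output.append(f"{delta}.{head}")
--         output.extend(f"0.{n}" for n in rest)
--
--     if len({n for day in days for n in buckets[day]}) == 1:
--         output += output
--     return ";".join(output)
-- ===== Notes on version B (the rewrite author's own statement) =====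
-- stated objective: alternative
-- what changed: A builds a unified 0/1 day mask, extracts an event-day list and rescans+sorts all components at every event day with an index counter into the day list; B never forms a mask: it builds an inverted index (day -> active names) in one component-major pass over each drug's own vector, sorts the index keys, precomputes the gap list by zipping the day list with its tail, and emits blocks by zipping gaps with days.
import Mathlib
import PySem

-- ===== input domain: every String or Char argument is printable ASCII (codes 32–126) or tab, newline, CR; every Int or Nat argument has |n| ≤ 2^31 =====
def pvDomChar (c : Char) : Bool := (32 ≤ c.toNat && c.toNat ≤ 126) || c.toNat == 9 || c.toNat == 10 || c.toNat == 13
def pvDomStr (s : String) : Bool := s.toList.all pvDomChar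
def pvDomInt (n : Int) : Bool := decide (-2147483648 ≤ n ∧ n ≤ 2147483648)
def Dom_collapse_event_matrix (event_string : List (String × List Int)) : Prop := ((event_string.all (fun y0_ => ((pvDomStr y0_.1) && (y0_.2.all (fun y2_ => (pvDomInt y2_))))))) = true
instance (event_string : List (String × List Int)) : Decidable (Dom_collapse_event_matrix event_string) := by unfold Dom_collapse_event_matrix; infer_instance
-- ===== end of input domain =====

-- B drops A's unified 0/1 mask, event-day list and per-event-day rescans: it builds an inverted
-- index day -> active names in one component-major pass, sorts its keys and zips out the gap tags;
-- objective: alternative (different algorithm, similar cost).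

-- ===== PORT A =====
-- active_names = sorted([comp for comp in components if event_string[comp][day] == 1])
def pvActiveA (event_string : List (String × List Int)) (components : List String) (day : Int) : List String :=
  PySem.List.sorted
    (components.filter (fun comp =>
      PySem.List.pyGetD ((PySem.Dict.mk event_string).getD comp []) day 0 == 1))
    (fun x => x)

-- one iteration of A's emit loop; state = (output, used_shift, event_index, component_first_use)
def pvEmitStepA (shift : Int) (event_days : List Int)
    (st : List String × Bool × Int × PySem.Set String) (e : Int × List String) :
    List String × Bool × Int × PySem.Set String :=
  let main := e.2.headD ""
  let tag :=
    if st.2.1 = false then PySem.Int.toStr shift ++ "." ++ main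
    else
      PySem.Int.toStr (PySem.List.pyGetD event_days st.2.2.1 0 -
        PySem.List.pyGetD event_days (st.2.2.1 - 1) 0) ++ "." ++ main
  let p := (e.2.drop 1).foldl
    (fun p nm => (p.1 ++ ["0." ++ nm], PySem.Set.add p.2 nm))
    (st.1 ++ [tag], PySem.Set.add st.2.2.2 main)
  (p.1, true, st.2.2.1 + 1, p.2)

def collapse_event_matrix (event_string : List (String × List Int)) : String :=
  let components := PySem.List.sorted (event_string.map Prod.fst) (fun x => x)
  match event_string with
  | [] => ""                                   -- Python: next(iter(...)) raises StopIteration (outside Pre_)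
  | (_, v0) :: _ =>
    if event_string.all (fun kv => kv.2.length == v0.length) then
      -- unified_events: [0]*num_days, then set 1 wherever any value is 1
      let unified := event_string.foldl
        (fun u kv => (PySem.List.enumerate kv.2).foldl
          (fun u iv => if iv.2 == 1 then PySem.List.pySetD u iv.1 1 else u) u)
        (List.replicate v0.length (0 : Int))
      let event_days := ((PySem.List.enumerate unified).filter (fun iv => iv.2 == 1)).map Prod.fst
      let tag_entries := event_days.foldl
        (fun acc day =>
          let activeNames := pvActiveA event_string components day
          if activeNames.isEmpty then acc else acc ++ [(day, activeNames)])
        ([] : List (Int × List String))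
      if tag_entries.isEmpty then ""
      else
        let last_day := (PySem.List.pyGetD tag_entries (-1) (0, [])).1   -- tag_entries[-1][0]
        let shift := (v0.length : Int) - last_day
        let st := tag_entries.foldl (pvEmitStepA shift event_days)
          ([], false, 0, PySem.Set.empty)
        if PySem.Set.len st.2.2.2 == 1 then PySem.Str.join ";" (st.1 ++ st.1)
        else PySem.Str.join ";" st.1
    else ""                                    -- Python: raise ValueError (outside Pre_)

-- ===== PORT B =====
-- one emitted block: the gap-prefixed head name plus the 0-prefixed co-active names
-- (buckets' values are built by append only, hence nonempty: headD/drop is exact for 'head, *rest = …')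
def pvBlock (delta : Int) (names : List String) : List String :=
  (PySem.Int.toStr delta ++ "." ++ names.headD "") :: (names.drop 1).map (fun n => "0." ++ n)

-- inner loop of B's index builder: add one component's active days into the inverted index
-- (Python: for day, val in enumerate(event_string[comp]): if val == 1: buckets.setdefault(day, []).append(comp))
def pvBucketStep (event_string : List (String × List Int))
    (d : PySem.Dict Int (List String)) (comp : String) : PySem.Dict Int (List String) :=
  (PySem.List.enumerate ((PySem.Dict.mk event_string).getD comp [])).foldl
    (fun d iv => if iv.2 == 1 then d.modify iv.1 [] (fun old => old ++ [comp]) else d) d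

def collapse_event_matrix_alt (event_string : List (String × List Int)) : String :=
  match event_string with
  | [] => ""                                   -- Python: next(iter(...)) raises StopIteration (outside Pre_)
  | (_, v0) :: _ =>
    if event_string.all (fun kv => kv.2.length == v0.length) then
      let buckets := (PySem.List.sorted (event_string.map Prod.fst) (fun x => x)).foldl
        (pvBucketStep event_string) PySem.Dict.empty
      let days := PySem.List.sorted buckets.keys (fun x => x)
      if days.isEmpty then ""
      else
        let deltas := ((v0.length : Int) - PySem.List.pyGetD days (-1) 0) ::
          (days.zip (days.drop 1)).map (fun p => p.2 - p.1)
        let output := (deltas.zip days).foldl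
          (fun out p => out ++ pvBlock p.1 (buckets.getD p.2 [])) []
        if PySem.Set.len (PySem.Set.ofList (days.flatMap (fun day => buckets.getD day []))) == 1 then
          PySem.Str.join ";" (output ++ output)
        else PySem.Str.join ";" output
    else ""                                    -- Python: raise ValueError (outside Pre_)

-- ===== PRECONDITION & SPEC =====
-- Pre_ excludes exactly the inputs where A raises: the empty dict (StopIteration) and value lists of
-- mismatched length (ValueError); duplicate keys are excluded only because the association list
-- encodes a Python dict, whose keys are necessarily distinct.
def Pre_collapse_event_matrix (event_string : List (String × List Int)) : Prop :=
  event_string ≠ [] ∧ (event_string.map Prod.fst).Nodup ∧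
    ∀ kv ∈ event_string, kv.2.length = (event_string.headD ("", [])).2.length
instance (event_string : List (String × List Int)) : Decidable (Pre_collapse_event_matrix event_string) := by
  unfold Pre_collapse_event_matrix; infer_instance

def pvWitness_collapse_event_matrix : (List (String × List Int)) :=
  [("cisplatin", [1, 0, 1]), ("etoposide", [1, 1, 0])]

def Spec_collapse_event_matrix (event_string : List (String × List Int)) (out : String) : Prop := out = collapse_event_matrix_alt event_string
instance (event_string : List (String × List Int)) (out : String) : Decidable (Spec_collapse_event_matrix event_string out) := by unfold Spec_collapse_event_matrix; infer_instance

-- ===== CLAIM (what is proved, stated in full; the proofs are below) =====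
def Claim_equal_collapse_event_matrix : Prop := ∀ (event_string : List (String × List Int)), Dom_collapse_event_matrix event_string → Pre_collapse_event_matrix event_string → Spec_collapse_event_matrix event_string (collapse_event_matrix event_string)

-- ===== LEMMAS AND PROOFS =====

-- the common spine of both emit loops: blocks with deltas between consecutive days
def pvFlat (prev : Int) : List (Int × List String) → List String
  | [] => []
  | e :: t => pvBlock (e.1 - prev) e.2 ++ pvFlat e.1 t

lemma pv_tailfold (tail : List String) : ∀ (o : List String) (u : PySem.Set String),
    tail.foldl (fun p nm => (p.1 ++ ["0." ++ nm], PySem.Set.add p.2 nm)) (o, u)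
      = (o ++ tail.map (fun nm => "0." ++ nm), PySem.Set.update u tail) := by
  induction tail with
  | nil => intro o u; simp [PySem.Set.update]
  | cons x t ih =>
    intro o u
    simp only [List.foldl_cons]
    rw [ih (o ++ ["0." ++ x]) (PySem.Set.add u x)]
    have h2 : PySem.Set.update u (x :: t) = PySem.Set.update (PySem.Set.add u x) t := rfl
    simp [h2]

lemma pv_entriesFold (h : Int → List String) : ∀ (l : List Int) (acc : List (Int × List String)),
    l.foldl (fun acc day => if (h day).isEmpty then acc else acc ++ [(day, h day)]) acc
      = acc ++ (l.filter (fun d => !(h d).isEmpty)).map (fun d => (d, h d)) := by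
  intro l
  induction l with
  | nil => intro acc; simp
  | cons d t ih =>
    intro acc
    simp only [List.foldl_cons, List.filter_cons]
    by_cases hd : (h d).isEmpty
    · rw [if_pos hd, ih]; simp [hd]
    · rw [if_neg hd, ih]; simp [hd]

lemma pv_getD_mk (es : List (String × List Int)) (hnd : (es.map Prod.fst).Nodup)
    (kv : String × List Int) (hm : kv ∈ es) : (PySem.Dict.mk es).getD kv.1 [] = kv.2 := by
  induction es with
  | nil => cases hm
  | cons hd tl ih =>
    have hgd : (PySem.Dict.mk (hd :: tl)).getD kv.1 [] = ((PySem.Dict.mk (hd :: tl)).get? kv.1).getD [] := rfl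
    rcases List.mem_cons.mp hm with rfl | hmem
    · rw [hgd, PySem.Dict.get?_mk_cons]; simp
    · rw [hgd, PySem.Dict.get?_mk_cons]
      have hne : ¬ (hd.1 == kv.1) = true := by
        simp only [List.map_cons, List.nodup_cons] at hnd
        intro hb
        exact hnd.1 (by simpa [beq_iff_eq.mp hb] using List.mem_map_of_mem (f := Prod.fst) hmem)
      rw [if_neg hne]
      exact ih (by simp only [List.map_cons, List.nodup_cons] at hnd; exact hnd.2) hmem

lemma pv_inner_len (v : List Int) : ∀ (s : Int) (u : List Int),
    ((PySem.List.enumerate v s).foldl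
        (fun u iv => if iv.2 == 1 then PySem.List.pySetD u iv.1 1 else u) u).length = u.length := by
  induction v with
  | nil => intro s u; rw [PySem.List.enumerate_nil]; rfl
  | cons x xs ih =>
    intro s u
    rw [PySem.List.enumerate_cons]
    simp only [List.foldl_cons]
    rw [ih]
    split
    · exact PySem.List.length_pySetD ..
    · rfl

lemma pv_setD_other (u : List Int) (m j : Nat) (hj : j ≠ m) :
    PySem.List.pyGetD (PySem.List.pySetD u (m : Int) 1) (j : Int) 0 = PySem.List.pyGetD u (j : Int) 0 := by
  by_cases hm : m < u.length
  · rw [PySem.List.pyGetD_pySetD_natCast u m j 1 0 hm, if_neg hj]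
  · have h : PySem.List.pySet? u (m : Int) 1 = none := by
      rw [PySem.List.pySet?_eq_none_iff]
      simp [PySem.Raise.InRange]
      omega
    have : PySem.List.pySetD u (m : Int) 1 = u := by simp [PySem.List.pySetD, h]
    rw [this]

lemma pv_inner_getD (v : List Int) : ∀ (m : Nat) (u : List Int) (j : Nat), j < u.length →
    PySem.List.pyGetD ((PySem.List.enumerate v (m : Int)).foldl
        (fun u iv => if iv.2 == 1 then PySem.List.pySetD u iv.1 1 else u) u) (j : Int) 0 =
      if m ≤ j ∧ j < m + v.length ∧ v.getD (j - m) 0 = 1 then 1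
      else PySem.List.pyGetD u (j : Int) 0 := by
  induction v with
  | nil =>
    intro m u j hj
    rw [PySem.List.enumerate_nil]
    simp only [List.foldl_nil, List.length_nil]
    rw [if_neg (by omega)]
  | cons x xs ih =>
    intro m u j hj
    rw [PySem.List.enumerate_cons]
    simp only [List.foldl_cons]
    have hcast : (m : Int) + 1 = ((m + 1 : Nat) : Int) := by push_cast; ring
    rw [hcast]
    set u' := (if (x == 1) = true then PySem.List.pySetD u (m : Int) 1 else u) with hu'
    have hlen' : u'.length = u.length := by
      rw [hu']; split
      · exact PySem.List.length_pySetD ..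
      · rfl
    rw [ih (m + 1) u' j (by omega)]
    by_cases hjm : j = m
    · subst hjm
      rw [if_neg (by omega)]
      by_cases hx : x = 1
      · subst hx
        rw [if_pos ⟨le_refl _, by simp only [List.length_cons]; omega, by simp⟩]
        have : u' = PySem.List.pySetD u (j : Int) 1 := by rw [hu']; simp
        rw [this, PySem.List.pyGetD_pySetD_natCast u j j 1 0 hj, if_pos rfl]
      · have hcond : ¬ (j ≤ j ∧ j < j + (x :: xs).length ∧ (x :: xs).getD (j - j) 0 = 1) := by
          simp [hx]
        rw [if_neg hcond]
        have : u' = u := by rw [hu']; simp [hx]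
        rw [this]
    · by_cases hlt : m < j
      · have hgd : (x :: xs).getD (j - m) 0 = xs.getD (j - (m + 1)) 0 := by
          have h1 : j - m = (j - (m + 1)) + 1 := by omega
          rw [h1]; rfl
        have hcond : (m + 1 ≤ j ∧ j < m + 1 + xs.length ∧ xs.getD (j - (m + 1)) 0 = 1)
            ↔ (m ≤ j ∧ j < m + (x :: xs).length ∧ (x :: xs).getD (j - m) 0 = 1) := by
          rw [hgd]; simp only [List.length_cons]; constructor <;> (rintro ⟨a, b, c⟩; exact ⟨by omega, by omega, c⟩)
        have hu'get : PySem.List.pyGetD u' (j : Int) 0 = PySem.List.pyGetD u (j : Int) 0 := by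
          rw [hu']; split
          · exact pv_setD_other u m j hjm
          · rfl
        rw [hu'get]
        split_ifs with h1 h2 h2
        · rfl
        · exact absurd (hcond.mp h1) h2
        · exact absurd (hcond.mpr h2) h1
        · rfl
      · rw [if_neg (by omega), if_neg (by omega)]
        rw [hu']; split
        · exact pv_setD_other u m j hjm
        · rfl

lemma pv_outer_len (es : List (String × List Int)) : ∀ (u : List Int),
    (es.foldl (fun u kv => (PySem.List.enumerate kv.2).foldl
        (fun u iv => if iv.2 == 1 then PySem.List.pySetD u iv.1 1 else u) u) u).length = u.length := by
  induction es with
  | nil => intro u; rfl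
  | cons kv rest ih =>
    intro u
    simp only [List.foldl_cons]
    rw [ih, pv_inner_len]

lemma pv_outer_getD (es : List (String × List Int)) : ∀ (u : List Int) (j : Nat), j < u.length →
    PySem.List.pyGetD (es.foldl (fun u kv => (PySem.List.enumerate kv.2).foldl
        (fun u iv => if iv.2 == 1 then PySem.List.pySetD u iv.1 1 else u) u) u) (j : Int) 0 =
      if es.any (fun kv => decide (j < kv.2.length) && (kv.2.getD j 0 == 1)) then 1
      else PySem.List.pyGetD u (j : Int) 0 := by
  induction es with
  | nil => intro u j hj; simp
  | cons kv rest ih =>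
    intro u j hj
    simp only [List.foldl_cons]
    set u' := (PySem.List.enumerate kv.2).foldl
        (fun u iv => if iv.2 == 1 then PySem.List.pySetD u iv.1 1 else u) u with hu'
    have hlen' : u'.length = u.length := by rw [hu']; exact pv_inner_len kv.2 0 u
    rw [ih u' j (by omega)]
    have hinner : PySem.List.pyGetD u' (j : Int) 0 =
        if 0 ≤ j ∧ j < 0 + kv.2.length ∧ kv.2.getD (j - 0) 0 = 1 then 1
        else PySem.List.pyGetD u (j : Int) 0 := by
      rw [hu']
      have h0 : (PySem.List.enumerate kv.2) = (PySem.List.enumerate kv.2 ((0 : Nat) : Int)) := by norm_num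
      rw [h0, pv_inner_getD kv.2 0 u j hj]
    simp only [List.any_cons]
    by_cases hr : rest.any (fun kv => decide (j < kv.2.length) && (kv.2.getD j 0 == 1)) = true
    · simp only [hr]; simp
    · simp only [Bool.not_eq_true] at hr
      simp only [hr]
      by_cases hc : j < kv.2.length ∧ kv.2.getD j 0 = 1
      · have hcnd : 0 ≤ j ∧ j < 0 + kv.2.length ∧ kv.2.getD (j - 0) 0 = 1 :=
          ⟨Nat.zero_le _, by omega, by simpa using hc.2⟩
        have hg : kv.2[j]'hc.1 = 1 := by
          have h2 := hc.2
          rwa [List.getD_eq_getElem _ _ hc.1] at h2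
        rw [hinner, if_pos hcnd]
        simp [hc.1, hg]
      · have hf : (decide (j < kv.2.length) && (kv.2.getD j 0 == 1)) = false := by
          rcases not_and_or.mp hc with h | h
          · simp [h]
          · simp only [Bool.and_eq_false_iff]
            right
            simpa using h
        have hncnd : ¬ (0 ≤ j ∧ j < 0 + kv.2.length ∧ kv.2.getD (j - 0) 0 = 1) := by
          rintro ⟨-, h1, h2⟩
          exact hc ⟨by omega, by simpa using h2⟩
        rw [hinner, if_neg hncnd]
        simp
        intro h1 h2
        exact absurd ⟨h1, by simpa [List.getD_eq_getElem?_getD] using h2⟩ hc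

lemma pv_any_len (j n : Nat) (hj : j < n) : ∀ (es : List (String × List Int)),
    (∀ kv ∈ es, kv.2.length = n) →
    es.any (fun kv => decide (j < kv.2.length) && (kv.2.getD j 0 == 1))
      = es.any (fun kv => kv.2.getD j 0 == 1) := by
  intro es
  induction es with
  | nil => intro _; rfl
  | cons kv rest ih =>
    intro hlen
    simp only [List.any_cons]
    rw [ih (fun kv h => hlen kv (List.mem_cons_of_mem _ h))]
    have hd : decide (j < kv.2.length) = true := by
      simp [hlen kv (List.mem_cons_self ..), hj]
    rw [hd, Bool.true_and]

lemma pv_unified_eq (es : List (String × List Int)) (n : Nat)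
    (hlen : ∀ kv ∈ es, kv.2.length = n) (j : Nat) (hj : j < n) :
    (PySem.List.pyGetD (es.foldl (fun u kv => (PySem.List.enumerate kv.2).foldl
        (fun u iv => if iv.2 == 1 then PySem.List.pySetD u iv.1 1 else u) u)
        (List.replicate n (0 : Int))) (j : Int) 0 == 1)
      = es.any (fun kv => kv.2.getD j 0 == 1) := by
  rw [pv_outer_getD es (List.replicate n 0) j (by simpa using hj)]
  rw [pv_any_len j n hj es hlen]
  by_cases h : es.any (fun kv => kv.2.getD j 0 == 1) = true
  · rw [if_pos h, h]; rfl
  · simp only [Bool.not_eq_true] at h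
    rw [if_neg (by rw [h]; exact Bool.false_ne_true), h]
    have hz : PySem.List.pyGetD (List.replicate n (0 : Int)) (j : Int) 0 = 0 := by
      rw [PySem.List.pyGetD_natCast]; exact List.getD_replicate _ hj
    rw [hz]; rfl

-- B's per-day filter, used on both sides once A's sort is discharged
def pvActiveB (event_string : List (String × List Int)) (components : List String) (day : Int) : List String :=
  components.filter (fun comp =>
    PySem.List.pyGetD ((PySem.Dict.mk event_string).getD comp []) day 0 == 1)

lemma pv_active_ne (es : List (String × List Int)) (hnd : (es.map Prod.fst).Nodup)
    (j : Nat) :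
    (!(pvActiveB es (PySem.List.sorted (es.map Prod.fst) (fun x => x)) (j : Int)).isEmpty)
      = es.any (fun kv => kv.2.getD j 0 == 1) := by
  rw [Bool.eq_iff_iff]
  unfold pvActiveB
  constructor
  · intro h
    have hne : (PySem.List.sorted (es.map Prod.fst) (fun x => x)).filter
        (fun comp => PySem.List.pyGetD ((PySem.Dict.mk es).getD comp []) (j : Int) 0 == 1) ≠ [] := by
      intro hcon
      rw [hcon] at h
      simp at h
    rw [ne_eq, List.filter_eq_nil_iff] at hne
    push Not at hne
    obtain ⟨c, hcm, hcp⟩ := hne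
    rw [PySem.List.mem_sorted] at hcm
    obtain ⟨kv, hkv, rfl⟩ := List.mem_map.mp hcm
    rw [List.any_eq_true]
    refine ⟨kv, hkv, ?_⟩
    rw [pv_getD_mk es hnd kv hkv, PySem.List.pyGetD_natCast] at hcp
    simpa using hcp
  · intro h
    obtain ⟨kv, hkv, hp⟩ := List.any_eq_true.mp h
    have hcm : kv.1 ∈ PySem.List.sorted (es.map Prod.fst) (fun x => x) :=
      (PySem.List.mem_sorted ..).mpr (List.mem_map_of_mem hkv)
    have hcp : (PySem.List.pyGetD ((PySem.Dict.mk es).getD kv.1 []) (j : Int) 0 == 1) = true := by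
      rw [pv_getD_mk es hnd kv hkv, PySem.List.pyGetD_natCast]
      simpa using hp
    simp only [Bool.not_eq_true', List.isEmpty_eq_false_iff]
    intro hcon
    rw [List.filter_eq_nil_iff] at hcon
    exact hcon kv.1 hcm hcp

lemma pv_active_pairwise (es : List (String × List Int)) (day : Int) :
    pvActiveA es (PySem.List.sorted (es.map Prod.fst) (fun x => x)) day
      = pvActiveB es (PySem.List.sorted (es.map Prod.fst) (fun x => x)) day := by
  unfold pvActiveA pvActiveB
  exact PySem.List.sorted_eq_self_of_pairwise _ _
    ((PySem.List.sorted_pairwise (es.map Prod.fst) (fun x => x)).filter _)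

-- A's emit loop, after the first entry, produces the pvFlat spine and the flattened name set
lemma pv_emitA (shift : Int) (t : List (Int × List String)) : ∀ (days : List Int) (k : Nat)
    (out : List String) (s : PySem.Set String),
    (∀ e ∈ t, e.2 ≠ []) → 1 ≤ k → days.drop k = t.map Prod.fst →
    (t.foldl (pvEmitStepA shift days) (out, true, (k : Int), s)).1
        = out ++ pvFlat (PySem.List.pyGetD days ((k : Int) - 1) 0) t
      ∧ (t.foldl (pvEmitStepA shift days) (out, true, (k : Int), s)).2.2.2
        = PySem.Set.update s (t.flatMap (fun e => e.2)) := by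
  induction t with
  | nil => intro days k out s _ _ _; exact ⟨by simp [pvFlat], by simp [PySem.Set.update]⟩
  | cons e trest ih =>
    intro days k out s hne hk hdrop
    obtain ⟨d, names⟩ := e
    obtain ⟨nm, tl, rfl⟩ : ∃ a b, names = a :: b := by
      rcases names with _ | ⟨a, b⟩
      · exact absurd rfl (hne (d, []) (List.mem_cons_self ..))
      · exact ⟨a, b, rfl⟩
    have hday : PySem.List.pyGetD days ((k : Int)) 0 = d := by
      have hg : days[k]? = some d := by
        have h1 : (days.drop k)[0]? = days[k + 0]? := List.getElem?_drop
        rw [hdrop] at h1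
        simpa using h1.symm
      rw [PySem.List.pyGetD_natCast, List.getD_eq_getElem?_getD, hg]
      rfl
    simp only [List.foldl_cons]
    have hstepA : pvEmitStepA shift days (out, true, (k : Int), s) (d, nm :: tl)
        = (out ++ pvBlock (d - PySem.List.pyGetD days ((k : Int) - 1) 0) (nm :: tl),
           true, (k : Int) + 1, PySem.Set.update s (nm :: tl)) := by
      unfold pvEmitStepA
      simp only [List.headD_cons, List.drop_one, List.tail_cons]
      rw [if_neg (by simp)]
      rw [pv_tailfold]
      simp only [hday]
      simp [pvBlock]
    rw [hstepA]
    have hcast : (k : Int) + 1 = ((k + 1 : Nat) : Int) := by push_cast; ring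
    have hprev : PySem.List.pyGetD days (((k + 1 : Nat) : Int) - 1) 0 = d := by
      rw [show ((k + 1 : Nat) : Int) - 1 = (k : Int) by push_cast; ring, hday]
    have hdrop' : days.drop (k + 1) = trest.map Prod.fst := by
      have h1 : List.drop 1 (List.drop k days) = List.drop (k + 1) days := List.drop_drop
      rw [hdrop] at h1
      simpa using h1.symm
    rw [hcast]
    have := ih days (k + 1)
      (out ++ pvBlock (d - PySem.List.pyGetD days ((k : Int) - 1) 0) (nm :: tl))
      (PySem.Set.update s (nm :: tl))
      (fun e he => hne e (List.mem_cons_of_mem _ he)) (by omega) hdrop'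
    rw [hprev] at this
    refine ⟨?_, ?_⟩
    · rw [this.1]
      simp [pvFlat]
    · rw [this.2]
      simp only [List.flatMap_cons]
      rw [PySem.Set.update_append]

-- A's first iteration consumes the shift tag
lemma pv_emitA_first (shift : Int) (days : List Int) (d : Int) (nm : String) (tl : List String)
    (out : List String) (s : PySem.Set String) :
    pvEmitStepA shift days (out, false, 0, s) (d, nm :: tl)
      = (out ++ pvBlock shift (nm :: tl), true, 1, PySem.Set.update s (nm :: tl)) := by
  unfold pvEmitStepA
  simp only [List.headD_cons, List.drop_one, List.tail_cons]
  rw [if_pos trivial, pv_tailfold]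
  simp [pvBlock]

-- B's zipped delta list produces the same spine
lemma pv_zipflat (h : Int → List String) : ∀ (ds : List Int) (prev : Int),
    ((((prev :: ds).zip ds).map (fun p => p.2 - p.1)).zip ds).flatMap
        (fun p => pvBlock p.1 (h p.2))
      = pvFlat prev (ds.map (fun d => (d, h d))) := by
  intro ds
  induction ds with
  | nil => intro prev; simp [pvFlat]
  | cons d ds ih =>
    intro prev
    simp only [List.zip_cons_cons, List.map_cons, List.flatMap_cons, pvFlat]
    rw [ih d]

-- the per-component filter of the enumerate list keeps at most the queried day
lemma pv_enum_filter (v : List Int) (q : Nat) : ∀ (m : Nat),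
    (PySem.List.enumerate v (m : Int)).filter (fun iv => iv.1 == (q : Int) && iv.2 == 1)
      = if m ≤ q ∧ q < m + v.length ∧ v.getD (q - m) 0 = 1 then [((q : Int), 1)] else [] := by
  induction v with
  | nil =>
    intro m
    rw [PySem.List.enumerate_nil]
    simp only [List.filter_nil, List.length_nil]
    rw [if_neg (by omega)]
  | cons x xs ih =>
    intro m
    rw [PySem.List.enumerate_cons]
    rw [List.filter_cons]
    have hcast : (m : Int) + 1 = ((m + 1 : Nat) : Int) := by push_cast; ring
    rw [hcast, ih (m + 1)]
    by_cases hmq : m = q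
    · subst hmq
      have h1 : ¬ (m + 1 ≤ m ∧ m < m + 1 + xs.length ∧ xs.getD (m - (m + 1)) 0 = 1) := by omega
      rw [if_neg h1]
      by_cases hx : x = 1
      · subst hx
        have : (((m : Int), (1 : Int)).1 == (m : Int) && ((m : Int), (1 : Int)).2 == 1) = true := by simp
        rw [if_pos this, if_pos ⟨le_refl _, by simp only [List.length_cons]; omega, by simp⟩]
      · rw [if_neg (by simpa using hx), if_neg (by simpa using hx)]
    · have : (((m : Int), x).1 == (q : Int) && ((m : Int), x).2 == 1) = false := by
        simp only [Bool.and_eq_false_iff]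
        left
        simpa using fun hc => hmq (by exact_mod_cast hc)
      rw [if_neg (by simp [this])]
      by_cases hlt : m < q
      · have hgd : (x :: xs).getD (q - m) 0 = xs.getD (q - (m + 1)) 0 := by
          have h1 : q - m = (q - (m + 1)) + 1 := by omega
          rw [h1]; rfl
        have hcond : (m + 1 ≤ q ∧ q < m + 1 + xs.length ∧ xs.getD (q - (m + 1)) 0 = 1)
            ↔ (m ≤ q ∧ q < m + (x :: xs).length ∧ (x :: xs).getD (q - m) 0 = 1) := by
          rw [hgd]; simp only [List.length_cons]; constructor <;> (rintro ⟨a, b, c⟩; exact ⟨by omega, by omega, c⟩)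
        split_ifs with h1 h2 h2
        · rfl
        · exact absurd (hcond.mp h1) h2
        · exact absurd (hcond.mpr h2) h1
        · rfl
      · rw [if_neg (by omega), if_neg (by omega)]

-- getD of one bucket step: the component is appended exactly on its active days
lemma pv_bucketStep_getD (es : List (String × List Int)) (d : PySem.Dict Int (List String))
    (comp : String) (q : Nat) :
    (pvBucketStep es d comp).getD (q : Int) []
      = d.getD (q : Int) [] ++
        (if q < ((PySem.Dict.mk es).getD comp []).length ∧
            ((PySem.Dict.mk es).getD comp []).getD q 0 = 1 then [comp] else []) := by
  unfold pvBucketStep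
  set v := (PySem.Dict.mk es).getD comp [] with hv
  rw [PySem.List.foldl_if_eq_foldl_filter]
  have hmap : ((PySem.List.enumerate v).filter (fun iv => iv.2 == 1)).foldl
        (fun d iv => d.modify iv.1 [] (fun old => old ++ [comp])) d
      = ((((PySem.List.enumerate v).filter (fun iv => iv.2 == 1)).map
            (fun iv => (iv.1, comp))).foldl
          (fun d p => d.modify p.1 [] (fun old => old ++ [p.2])) d) := by
    rw [List.foldl_map]
  rw [hmap, PySem.Dict.getD_foldl_modify_append]
  congr 1
  rw [List.filter_map]
  have hcomp : (((PySem.List.enumerate v).filter (fun iv => iv.2 == 1)).filter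
        ((fun p => p.1 == (q : Int)) ∘ (fun iv => (iv.1, comp))))
      = ((PySem.List.enumerate v).filter (fun iv => iv.2 == 1)).filter
          (fun iv => iv.1 == (q : Int)) := rfl
  rw [hcomp, List.filter_filter]
  have h0 : PySem.List.enumerate v = PySem.List.enumerate v (((0 : Nat) : Int)) := by norm_num
  rw [h0, pv_enum_filter v q 0]
  split_ifs with h1 h2 h2
  · rfl
  · exact absurd ⟨by omega, by simpa using h1.2.2⟩ h2
  · exact absurd ⟨by omega, by omega, by simpa using h2.2⟩ h1
  · rfl

-- getD through the whole component-major fold: exactly the active components, in comps order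
lemma pv_buckets_getD (es : List (String × List Int)) (comps : List String) (q : Nat) :
    ∀ (d : PySem.Dict Int (List String)),
    (comps.foldl (pvBucketStep es) d).getD (q : Int) []
      = d.getD (q : Int) [] ++
        comps.filter (fun c => decide (q < ((PySem.Dict.mk es).getD c []).length) &&
          (((PySem.Dict.mk es).getD c []).getD q 0 == 1)) := by
  induction comps with
  | nil => intro d; simp
  | cons c cs ih =>
    intro d
    simp only [List.foldl_cons, List.filter_cons]
    rw [ih, pv_bucketStep_getD]
    by_cases hc : q < ((PySem.Dict.mk es).getD c []).length ∧ ((PySem.Dict.mk es).getD c []).getD q 0 = 1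
    · have hg : ((PySem.Dict.mk es).getD c [])[q]'hc.1 = 1 := by
        have h2 := hc.2
        rwa [List.getD_eq_getElem _ _ hc.1] at h2
      rw [if_pos hc, if_pos (by simp [hc.1, hg])]
      simp
    · rw [if_neg hc]
      have : (decide (q < ((PySem.Dict.mk es).getD c []).length) &&
          (((PySem.Dict.mk es).getD c []).getD q 0 == 1)) = false := by
        rcases not_and_or.mp hc with h | h
        · simp [h]
        · simp only [Bool.and_eq_false_iff]; right; simpa using h
      rw [if_neg (by rw [this]; exact Bool.false_ne_true)]
      simp

-- keys of one bucket step
lemma pv_bucketStep_keys (es : List (String × List Int)) (d : PySem.Dict Int (List String))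
    (comp : String) :
    (pvBucketStep es d comp).keys
      = PySem.Set.update d.keys
          (((PySem.List.enumerate ((PySem.Dict.mk es).getD comp [])).filter
              (fun iv => iv.2 == 1)).map Prod.fst) := by
  unfold pvBucketStep
  rw [PySem.List.foldl_if_eq_foldl_filter]
  exact PySem.Dict.keys_foldl_modify_key _ Prod.fst [] (fun _ iv => (fun old => old ++ [comp])) d

lemma pv_buckets_keys_nodup (es : List (String × List Int)) (comps : List String) :
    ∀ (d : PySem.Dict Int (List String)), d.keys.Nodup →
    (comps.foldl (pvBucketStep es) d).keys.Nodup := by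
  induction comps with
  | nil => intro d h; exact h
  | cons c cs ih =>
    intro d h
    simp only [List.foldl_cons]
    exact ih _ (by rw [pv_bucketStep_keys]; exact PySem.Set.nodup_update _ _ h)

lemma pv_mem_buckets_keys (es : List (String × List Int)) (comps : List String) (x : Int) :
    ∀ (d : PySem.Dict Int (List String)),
    (x ∈ (comps.foldl (pvBucketStep es) d).keys
      ↔ x ∈ d.keys ∨ ∃ c ∈ comps,
          x ∈ ((PySem.List.enumerate ((PySem.Dict.mk es).getD c [])).filter
              (fun iv => iv.2 == 1)).map Prod.fst) := by
  induction comps with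
  | nil => intro d; simp
  | cons c cs ih =>
    intro d
    simp only [List.foldl_cons]
    rw [ih]
    rw [pv_bucketStep_keys, PySem.Set.mem_update]
    constructor
    · rintro (⟨h | h⟩ | ⟨c', hc', hm⟩)
      · exact Or.inl h
      · exact Or.inr ⟨c, List.mem_cons_self .., h⟩
      · exact Or.inr ⟨c', List.mem_cons_of_mem _ hc', hm⟩
    · rintro (h | ⟨c', hc', hm⟩)
      · exact Or.inl (Or.inl h)
      · rcases List.mem_cons.mp hc' with rfl | hc'
        · exact Or.inl (Or.inr hm)
        · exact Or.inr ⟨c', hc', hm⟩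

-- the active-day list of one component, as a filtered range
lemma pv_activeDays (v : List Int) :
    ((PySem.List.enumerate v).filter (fun iv => iv.2 == 1)).map Prod.fst
      = (PySem.List.pyRange 0 (PySem.List.len v) 1).filter
          (fun j => PySem.List.pyGetD v j 0 == 1) := by
  rw [PySem.List.enumerate_eq_map_pyRange v 0, List.filter_map, List.map_map]
  have hfst : Prod.fst ∘ (fun j : Int => (j, PySem.List.pyGetD v j 0)) = fun j : Int => j := rfl
  have hp : ((fun iv : Int × Int => iv.2 == 1) ∘ (fun j : Int => (j, PySem.List.pyGetD v j 0)))
      = fun j : Int => PySem.List.pyGetD v j 0 == 1 := rfl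
  rw [hfst, hp, List.map_id']

-- sorted bucket keys = A's event-day list (the filtered day range)
lemma pv_days_eq (es : List (String × List Int)) (n : Nat)
    (hnd : (es.map Prod.fst).Nodup) (hlen : ∀ kv ∈ es, kv.2.length = n) :
    PySem.List.sorted
        (((PySem.List.sorted (es.map Prod.fst) (fun x => x)).foldl
            (pvBucketStep es) PySem.Dict.empty).keys) (fun x => x)
      = (PySem.List.pyRange 0 (n : Int) 1).filter
          (fun dd => !(pvActiveB es (PySem.List.sorted (es.map Prod.fst) (fun x => x)) dd).isEmpty) := by
  set comps := PySem.List.sorted (es.map Prod.fst) (fun x => x) with hcomps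
  apply PySem.List.sorted_eq_of_perm_of_pairwise_lt
  · rw [List.perm_ext_iff_of_nodup
      ((PySem.List.nodup_pyRange_one 0 (n : Int)).filter _)
      (pv_buckets_keys_nodup es comps PySem.Dict.empty PySem.Dict.nodup_keys_empty)]
    intro x
    rw [pv_mem_buckets_keys, PySem.Dict.keys_empty, List.mem_filter, PySem.List.mem_pyRange_one]
    simp only [List.not_mem_nil, false_or]
    constructor
    · rintro ⟨⟨hx0, hxn⟩, hne⟩
      obtain ⟨j, rfl, hj⟩ : ∃ jn : Nat, x = (jn : Int) ∧ jn < n := ⟨x.toNat, by omega, by omega⟩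
      have hne' : pvActiveB es comps ((j : Nat) : Int) ≠ [] := by simpa using hne
      unfold pvActiveB at hne'
      obtain ⟨c, hcm, hcp⟩ : ∃ c ∈ comps,
          (PySem.List.pyGetD ((PySem.Dict.mk es).getD c []) ((j : Nat) : Int) 0 == 1) = true := by
        rcases hf : comps.filter (fun comp =>
            PySem.List.pyGetD ((PySem.Dict.mk es).getD comp []) ((j : Nat) : Int) 0 == 1) with _ | ⟨y, ys⟩
        · exact absurd hf hne'
        · have hy : y ∈ comps.filter (fun comp =>
              PySem.List.pyGetD ((PySem.Dict.mk es).getD comp []) ((j : Nat) : Int) 0 == 1) := by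
            rw [hf]; exact List.mem_cons_self ..
          exact ⟨y, (List.mem_filter.mp hy).1, (List.mem_filter.mp hy).2⟩
      refine ⟨c, hcm, ?_⟩
      rw [pv_activeDays, List.mem_filter, PySem.List.mem_pyRange_one]
      have hc' : c ∈ es.map Prod.fst := by rw [hcomps, PySem.List.mem_sorted] at hcm; exact hcm
      obtain ⟨kv, hkv, rfl⟩ := List.mem_map.mp hc'
      have hvl : ((PySem.Dict.mk es).getD kv.1 []).length = n := by
        rw [pv_getD_mk es hnd kv hkv]; exact hlen kv hkv
      refine ⟨⟨by omega, ?_⟩, hcp⟩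
      simp [PySem.List.len, hvl]; omega
    · rintro ⟨c, hcm, hm⟩
      rw [pv_activeDays, List.mem_filter, PySem.List.mem_pyRange_one] at hm
      obtain ⟨⟨hx0, hxl⟩, hp⟩ := hm
      have hc' : c ∈ es.map Prod.fst := by rw [hcomps, PySem.List.mem_sorted] at hcm; exact hcm
      obtain ⟨kv, hkv, rfl⟩ := List.mem_map.mp hc'
      have hvl : ((PySem.Dict.mk es).getD kv.1 []).length = n := by
        rw [pv_getD_mk es hnd kv hkv]; exact hlen kv hkv
      have hxn : x < (n : Int) := by
        have := hxl
        simp [PySem.List.len, hvl] at this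
        exact this
      refine ⟨⟨hx0, hxn⟩, ?_⟩
      simp only [Bool.not_eq_true', List.isEmpty_eq_false_iff]
      unfold pvActiveB
      intro hcon
      rw [List.filter_eq_nil_iff] at hcon
      exact hcon kv.1 hcm hp
  · exact (PySem.List.pairwise_lt_pyRange_one 0 (n : Int)).filter _

-- bucket lookup on an in-range day is B's per-day filter
lemma pv_buckets_getD_active (es : List (String × List Int)) (n : Nat)
    (hnd : (es.map Prod.fst).Nodup) (hlen : ∀ kv ∈ es, kv.2.length = n)
    (q : Nat) (hq : q < n) :
    ((PySem.List.sorted (es.map Prod.fst) (fun x => x)).foldl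
        (pvBucketStep es) PySem.Dict.empty).getD ((q : Nat) : Int) []
      = pvActiveB es (PySem.List.sorted (es.map Prod.fst) (fun x => x)) ((q : Nat) : Int) := by
  rw [pv_buckets_getD, PySem.Dict.getD_empty]
  unfold pvActiveB
  simp only [List.nil_append]
  apply List.filter_congr
  intro c hcm
  have hc' : c ∈ es.map Prod.fst := by rw [PySem.List.mem_sorted] at hcm; exact hcm
  obtain ⟨kv, hkv, rfl⟩ := List.mem_map.mp hc'
  have hvl : ((PySem.Dict.mk es).getD kv.1 []).length = n := by
    rw [pv_getD_mk es hnd kv hkv]; exact hlen kv hkv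
  rw [PySem.List.pyGetD_natCast]
  simp [hvl, hq]

-- final assembly: both emit phases, over the same day list and name function, give the same string
lemma pv_final (n : Nat) (days : List Int) (h : Int → List String)
    (hne : ∀ d ∈ days, h d ≠ []) :
    (if ((days.map (fun d => (d, h d))).isEmpty) = true then ""
     else
       if (PySem.Set.len (((days.map (fun d => (d, h d))).foldl
              (pvEmitStepA ((n : Int) - (PySem.List.pyGetD (days.map (fun d => (d, h d))) (-1) ((0 : Int), ([] : List String))).1) days)
              ([], false, 0, PySem.Set.empty)).2.2.2) == 1) = true then
         PySem.Str.join ";" (((days.map (fun d => (d, h d))).foldl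
              (pvEmitStepA ((n : Int) - (PySem.List.pyGetD (days.map (fun d => (d, h d))) (-1) ((0 : Int), ([] : List String))).1) days)
              ([], false, 0, PySem.Set.empty)).1 ++ ((days.map (fun d => (d, h d))).foldl
              (pvEmitStepA ((n : Int) - (PySem.List.pyGetD (days.map (fun d => (d, h d))) (-1) ((0 : Int), ([] : List String))).1) days)
              ([], false, 0, PySem.Set.empty)).1)
       else
         PySem.Str.join ";" (((days.map (fun d => (d, h d))).foldl
              (pvEmitStepA ((n : Int) - (PySem.List.pyGetD (days.map (fun d => (d, h d))) (-1) ((0 : Int), ([] : List String))).1) days)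
              ([], false, 0, PySem.Set.empty)).1))
    = (if days.isEmpty = true then ""
       else
         if (PySem.Set.len (PySem.Set.ofList (days.flatMap h)) == 1) = true then
           PySem.Str.join ";"
             (((((n : Int) - PySem.List.pyGetD days (-1) 0) ::
                  (days.zip (days.drop 1)).map (fun p => p.2 - p.1)).zip days).flatMap
                (fun p => pvBlock p.1 (h p.2)) ++
              ((((n : Int) - PySem.List.pyGetD days (-1) 0) ::
                  (days.zip (days.drop 1)).map (fun p => p.2 - p.1)).zip days).flatMap
                (fun p => pvBlock p.1 (h p.2)))
         else
           PySem.Str.join ";"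
             (((((n : Int) - PySem.List.pyGetD days (-1) 0) ::
                  (days.zip (days.drop 1)).map (fun p => p.2 - p.1)).zip days).flatMap
                (fun p => pvBlock p.1 (h p.2)))) := by
  rcases days with _ | ⟨d0, ds⟩
  · rfl
  · obtain ⟨nm, tl, hnm⟩ : ∃ a b, h d0 = a :: b := by
      rcases hh : h d0 with _ | ⟨a, b⟩
      · exact absurd hh (hne d0 (List.mem_cons_self ..))
      · exact ⟨a, b, rfl⟩
    simp only [List.map_cons, List.isEmpty_cons]
    rw [if_neg Bool.false_ne_true, if_neg Bool.false_ne_true]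
    -- the two shifts agree
    have hlastA : (PySem.List.pyGetD ((d0, h d0) :: ds.map (fun d => (d, h d))) (-1)
        ((0 : Int), ([] : List String))).1 = PySem.List.pyGetD (d0 :: ds) (-1) 0 := by
      have hm : (d0, h d0) :: ds.map (fun d => (d, h d)) = (d0 :: ds).map (fun d => (d, h d)) := by
        simp
      rw [hm, PySem.List.pyGetD_neg_one _ _ (by simp), PySem.List.pyGetD_neg_one _ _ (by simp),
        List.getLast_map]
    rw [hlastA]
    set shift := (n : Int) - PySem.List.pyGetD (d0 :: ds) (-1) 0 with hshift
    -- A's emit loop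
    have hAfold : (((d0, h d0) :: ds.map (fun d => (d, h d))).foldl
          (pvEmitStepA shift (d0 :: ds)) ([], false, 0, PySem.Set.empty)).1
            = pvBlock shift (h d0) ++ pvFlat d0 (ds.map (fun d => (d, h d)))
        ∧ (((d0, h d0) :: ds.map (fun d => (d, h d))).foldl
          (pvEmitStepA shift (d0 :: ds)) ([], false, 0, PySem.Set.empty)).2.2.2
            = PySem.Set.ofList ((d0 :: ds).flatMap h) := by
      simp only [List.foldl_cons]
      rw [hnm, pv_emitA_first]
      have hdrop : (d0 :: ds).drop 1 = (ds.map (fun d => (d, h d))).map Prod.fst := by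
        simp only [List.drop_one, List.tail_cons, List.map_map]
        exact (List.map_id' ds).symm
      have hnee : ∀ e ∈ ds.map (fun d => (d, h d)), e.2 ≠ [] := by
        intro e he
        obtain ⟨d, hd, rfl⟩ := List.mem_map.mp he
        exact hne d (List.mem_cons_of_mem _ hd)
      have hmain := pv_emitA shift (ds.map (fun d => (d, h d))) (d0 :: ds) 1
        ([] ++ pvBlock shift (nm :: tl)) (PySem.Set.update PySem.Set.empty (nm :: tl))
        hnee (le_refl 1) hdrop
      have hprev : PySem.List.pyGetD (d0 :: ds) (((1 : Nat) : Int) - 1) 0 = d0 := by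
        norm_num [PySem.List.pyGetD_zero_cons]
      rw [hprev] at hmain
      rw [show ((1 : Nat) : Int) = 1 from by norm_num] at hmain
      constructor
      · rw [hmain.1]
        simp
      · rw [hmain.2]
        have hfm : (ds.map (fun d => (d, h d))).flatMap (fun e => e.2) = ds.flatMap h := by
          rw [List.flatMap_map]
        rw [hfm, ← hnm, ← PySem.Set.update_append, ← List.flatMap_cons, PySem.Set.update_empty]
    -- B's emit list
    have hBout : (((shift :: ((d0 :: ds).zip ds).map (fun p => p.2 - p.1)).zip (d0 :: ds)).flatMap
          (fun p => pvBlock p.1 (h p.2)))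
        = pvBlock shift (h d0) ++ pvFlat d0 (ds.map (fun d => (d, h d))) := by
      simp only [List.zip_cons_cons, List.flatMap_cons]
      rw [pv_zipflat h ds d0]
    rw [hAfold.1, hAfold.2]
    simp only [List.drop_one, List.tail_cons]
    rw [hBout]

-- ===== VERDICT (by name: the statement is the Claim_ definition above) =====
theorem collapse_event_matrix_spec : Claim_equal_collapse_event_matrix := by
  unfold Claim_equal_collapse_event_matrix
  intro es _hdom hpre
  obtain ⟨hne0, hnd, hlen0⟩ := hpre
  unfold Spec_collapse_event_matrix
  obtain ⟨⟨k0, v0⟩, rest, rfl⟩ : ∃ a b, es = a :: b := by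
    rcases es with _ | ⟨a, b⟩
    · exact absurd rfl hne0
    · exact ⟨a, b, rfl⟩
  have hlen : ∀ kv ∈ (k0, v0) :: rest, kv.2.length = v0.length := by simpa using hlen0
  have hall : ((k0, v0) :: rest).all (fun kv => kv.2.length == v0.length) = true := by
    rw [List.all_eq_true]
    intro kv hkv
    simpa using hlen kv hkv
  simp only [collapse_event_matrix, collapse_event_matrix_alt]
  rw [if_pos hall, if_pos hall]
  set comps := PySem.List.sorted (((k0, v0) :: rest).map Prod.fst) (fun x => x) with hcomps
  set uni := ((k0, v0) :: rest).foldl (fun u kv => (PySem.List.enumerate kv.2).foldl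
      (fun u iv => if iv.2 == 1 then PySem.List.pySetD u iv.1 1 else u) u)
      (List.replicate v0.length (0 : Int)) with huni
  have hulen : uni.length = v0.length := by
    rw [huni, pv_outer_len]
    simp
  -- A's event-day list is the filtered day range
  have hdays : ((PySem.List.enumerate uni).filter (fun iv => iv.2 == 1)).map Prod.fst
      = (PySem.List.pyRange 0 ((v0.length : Nat) : Int) 1).filter
          (fun d => !(pvActiveB ((k0, v0) :: rest) comps d).isEmpty) := by
    rw [pv_activeDays uni]
    have hl : PySem.List.len uni = ((v0.length : Nat) : Int) := by
      simp [PySem.List.len, hulen]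
    rw [hl]
    apply List.filter_congr
    intro d hd
    rw [PySem.List.mem_pyRange_one] at hd
    obtain ⟨j, rfl, hj⟩ : ∃ jn : Nat, d = (jn : Int) ∧ jn < v0.length := ⟨d.toNat, by omega, by omega⟩
    have h1 := pv_unified_eq ((k0, v0) :: rest) v0.length hlen j hj
    rw [← huni] at h1
    rw [h1, hcomps]
    exact (pv_active_ne ((k0, v0) :: rest) hnd j).symm
  rw [hdays]
  -- sorted filters are plain filters
  have hAB : pvActiveA ((k0, v0) :: rest) comps = pvActiveB ((k0, v0) :: rest) comps := by
    rw [hcomps]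
    exact funext (pv_active_pairwise ((k0, v0) :: rest))
  simp only [hAB]
  rw [pv_entriesFold (fun day => pvActiveB ((k0, v0) :: rest) comps day)
      ((PySem.List.pyRange 0 ((v0.length : Nat) : Int) 1).filter
        (fun d => !(pvActiveB ((k0, v0) :: rest) comps d).isEmpty)) []]
  simp only [List.nil_append, List.filter_filter, Bool.and_self]
  -- B's sorted bucket keys are the same filtered day range
  have hdaysB : PySem.List.sorted ((comps.foldl (pvBucketStep ((k0, v0) :: rest)) PySem.Dict.empty).keys) (fun x => x)
      = (PySem.List.pyRange 0 ((v0.length : Nat) : Int) 1).filter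
          (fun dd => !(pvActiveB ((k0, v0) :: rest) comps dd).isEmpty) := by
    rw [hcomps]
    exact pv_days_eq ((k0, v0) :: rest) v0.length hnd hlen
  rw [hdaysB]
  set days := (PySem.List.pyRange 0 ((v0.length : Nat) : Int) 1).filter
      (fun dd => !(pvActiveB ((k0, v0) :: rest) comps dd).isEmpty) with hdaysdef
  set h := fun d => pvActiveB ((k0, v0) :: rest) comps d with hh
  -- bucket lookups along days are h
  have hgetD : ∀ d ∈ days, (comps.foldl (pvBucketStep ((k0, v0) :: rest)) PySem.Dict.empty).getD d [] = h d := by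
    intro d hd
    rw [hdaysdef, List.mem_filter, PySem.List.mem_pyRange_one] at hd
    obtain ⟨j, rfl, hj⟩ : ∃ jn : Nat, d = (jn : Int) ∧ jn < v0.length :=
      ⟨d.toNat, by omega, by omega⟩
    rw [hcomps]
    exact pv_buckets_getD_active ((k0, v0) :: rest) v0.length hnd hlen j hj
  -- B's emit fold is a flatMap, and its bucket lookups are h
  have hBfold : ∀ (dl : List (Int × Int)), (∀ p ∈ dl, p.2 ∈ days) →
      dl.foldl (fun out p => out ++ pvBlock p.1
          ((comps.foldl (pvBucketStep ((k0, v0) :: rest)) PySem.Dict.empty).getD p.2 [])) []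
        = dl.flatMap (fun p => pvBlock p.1 (h p.2)) := by
    intro dl hdl
    rw [PySem.List.foldl_append_eq_flatMap]
    simp only [List.nil_append]
    exact List.flatMap_congr (fun p hp => by rw [hgetD p.2 (hdl p hp)])
  have hBset : days.flatMap (fun day =>
        (comps.foldl (pvBucketStep ((k0, v0) :: rest)) PySem.Dict.empty).getD day [])
      = days.flatMap h := List.flatMap_congr (fun d hd => hgetD d hd)
  have hmemzip : ∀ p ∈ ((((v0.length : Int)) - PySem.List.pyGetD days (-1) 0) ::
      (days.zip (days.drop 1)).map (fun p => p.2 - p.1)).zip days, p.2 ∈ days := by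
    intro p hp
    obtain ⟨a, b⟩ := p
    exact (List.of_mem_zip hp).2
  rw [hBfold _ hmemzip, hBset]
  have hne' : ∀ d ∈ days, h d ≠ [] := by
    intro d hd
    rw [hdaysdef, List.mem_filter] at hd
    simpa using hd.2
  exact pv_final v0.length days h hne'
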